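-- pv_equiv track=rewrite | github.com/hving11770712/botdudoantx-fixall | lenh/config.py | validate_markdown_v2
-- ===== SOURCE A (Python) =====
-- def validate_markdown_v2(text: str) -> bool:
--     """Kiểm tra cú pháp MarkdownV2 có hợp lệ không."""
--     special_chars = ["_", "*", "[", "]", "(", ")", "~", "`", ">", "#", "+", "-", "=", "|", "{", "}", ".", "!"]
--     stack = []
--     i = 0
--     while i < len(text):
--         if text[i] == "\\" and i + 1 < len(text):
--             i += 2
--             continue
--         if text[i] in ["_", "*", "`"]:
--             if stack and stack[-1] == text[i]:
--                 stack.pop()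
--             else:
--                 stack.append(text[i])
--         i += 1
--     return len(stack) == 0
-- ===== SOURCE B (Python) =====
-- def _cancel_once(w):
--     """One left-to-right sweep cancelling disjoint adjacent equal markers."""
--     out = []
--     i = 0
--     while i < len(w):
--         if i + 1 < len(w) and w[i] == w[i + 1]:
--             i += 2
--         else:
--             out.append(w[i])
--             i += 1
--     return out
--
--
-- def validate_markdown_v2(text: str) -> bool:
--     """Kiểm tra cú pháp MarkdownV2 có hợp lệ không."""
--     # pass 1: collect the unescaped emphasis markers, dropping everything else
--     markers = []
--     it = iter(text)
--     for ch in it: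
--         if ch == "\\":
--             next(it, None)          # skip the escaped character
--         elif ch in "_*`":
--             markers.append(ch)
--     # pass 2: rewrite to normal form: repeatedly cancel adjacent equal markers
--     w = markers
--     while True:
--         w2 = _cancel_once(w)
--         if len(w2) < len(w):
--             w = w2
--         else:
--             break
--     return len(w) == 0
-- ===== Notes on version B (the rewrite author's own statement) =====
-- stated objective: alternative
-- what changed: A's single index-driven while loop maintaining an explicit stack is replaced by a stack-free rewriting algorithm: one iterator pass extracts the unescaped emphasis markers, then adjacent equal markers are repeatedly cancelled until a fixed point; the text is valid iff the normal form is empty (equal to A's stack reduction by confluence of adjacent-pair cancellation).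
import Mathlib
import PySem

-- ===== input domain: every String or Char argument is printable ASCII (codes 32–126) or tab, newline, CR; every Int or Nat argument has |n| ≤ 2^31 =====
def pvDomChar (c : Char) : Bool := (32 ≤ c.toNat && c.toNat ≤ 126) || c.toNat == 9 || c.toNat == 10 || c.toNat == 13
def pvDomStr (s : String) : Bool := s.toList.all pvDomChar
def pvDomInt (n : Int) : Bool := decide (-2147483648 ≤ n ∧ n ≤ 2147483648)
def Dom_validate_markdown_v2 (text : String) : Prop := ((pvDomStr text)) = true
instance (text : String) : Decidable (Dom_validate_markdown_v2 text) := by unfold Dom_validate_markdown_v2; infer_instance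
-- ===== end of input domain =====

-- B replaces A's stack machine by a stack-free rewriting algorithm: extract the unescaped
-- emphasis markers, then repeatedly cancel adjacent equal markers to a fixed point and test
-- emptiness; objective: alternative, measured constant-factor faster (iterator passes avoid A's per-index text[i] lookups); same result by confluence of adjacent-pair cancellation.

-- ===== PORT A =====
-- A's while loop over index i, carried as the remaining suffix of the character list;
-- the stack's top is the list head (Python stack[-1]/append/pop at the end).
def vmA_loop : List Char → List Char → List Char
  | [], stack => stack
  | '\\' :: _ :: rest, stack => vmA_loop rest stack          -- text[i]=='\\' and i+1<len: i += 2
  | c :: rest, stack =>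
      if c = '_' ∨ c = '*' ∨ c = '`' then
        match stack with
        | t :: s => if t = c then vmA_loop rest s else vmA_loop rest (c :: t :: s)
        | [] => vmA_loop rest [c]
      else vmA_loop rest stack

def validate_markdown_v2 (text : String) : Bool :=
  (vmA_loop text.toList []).length == 0

-- ===== PORT B =====
-- pass 1: keep only the unescaped emphasis markers (skip the character after a backslash)
def vmB_extract : List Char → List Char
  | [] => []
  | '\\' :: _ :: rest => vmB_extract rest
  | '\\' :: [] => []
  | c :: rest => if c = '_' ∨ c = '*' ∨ c = '`' then c :: vmB_extract rest else vmB_extract rest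

-- one left-to-right sweep cancelling disjoint adjacent equal markers (_cancel_once)
def vmB_cancelOnce : List Char → List Char
  | a :: b :: rest => if a = b then vmB_cancelOnce rest else a :: vmB_cancelOnce (b :: rest)
  | l => l

-- pass 2: rewrite to the fixed point (the `while True` loop of Source B)
def vmB_cancelFix (w : List Char) : List Char :=
  if h : (vmB_cancelOnce w).length < w.length then vmB_cancelFix (vmB_cancelOnce w) else w
termination_by w.length

def validate_markdown_v2_alt (text : String) : Bool :=
  (vmB_cancelFix (vmB_extract text.toList)).length == 0

-- ===== PRECONDITION & SPEC =====
def Spec_validate_markdown_v2 (text : String) (out : Bool) : Prop := out = validate_markdown_v2_alt text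
instance (text : String) (out : Bool) : Decidable (Spec_validate_markdown_v2 text out) := by unfold Spec_validate_markdown_v2; infer_instance

-- ===== CLAIM =====
def Claim_equal_validate_markdown_v2 : Prop := ∀ (text : String), Dom_validate_markdown_v2 text → Spec_validate_markdown_v2 text (validate_markdown_v2 text)

-- ===== LEMMAS AND PROOFS =====

-- proof-side stack step (one iteration of A's matching branch)
def pvStep (st : List Char) (c : Char) : List Char :=
  if c = '_' ∨ c = '*' ∨ c = '`' then
    match st with
    | t :: s => if t = c then s else c :: t :: s
    | [] => [c]
  else st

theorem cancelOnce_short (l : List Char)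
    (h : ∀ (a b : Char) (rest : List Char), l = a :: b :: rest → False) :
    vmB_cancelOnce l = l := by
  match l, h with
  | [], _ => rfl
  | [a], _ => rfl
  | a :: b :: rest, h => exact absurd rfl (by intro hh; exact h a b rest hh)


theorem cancelOnce_length_le (w : List Char) :
    (vmB_cancelOnce w).length ≤ w.length := by
  induction w using vmB_cancelOnce.induct with
  | case1 b rest ih =>
      rw [show vmB_cancelOnce (b :: b :: rest) = vmB_cancelOnce rest from by
        simp [vmB_cancelOnce]]
      simp
      omega
  | case2 a b rest h ih => simp only [vmB_cancelOnce, if_neg h]; simp at ih ⊢; omega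
  | case3 l h => rw [cancelOnce_short l h]

theorem vmA_eq_fold_extract (cs : List Char) :
    ∀ stack, vmA_loop cs stack = (vmB_extract cs).foldl pvStep stack := by
  induction cs using vmB_extract.induct with
  | case1 => intro stack; simp [vmA_loop, vmB_extract]
  | case2 c rest ih => intro stack; simpa [vmA_loop, vmB_extract] using ih stack
  | case3 => intro stack; show vmA_loop ['\\'] stack = stack; rfl
  | case4 c rest h1 h2 hm ih =>
      intro stack
      have hA : vmA_loop (c :: rest) stack =
          (if c = '_' ∨ c = '*' ∨ c = '`' then
            match stack with
            | t :: s => if t = c then vmA_loop rest s else vmA_loop rest (c :: t :: s)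
            | [] => vmA_loop rest [c]
          else vmA_loop rest stack) := by
        cases rest <;> cases stack <;> simp [vmA_loop]
      rw [hA]
      simp only [vmB_extract, if_pos hm]
      cases stack with
      | nil => simp [List.foldl, pvStep, hm, ih]
      | cons t s =>
          by_cases ht : t = c
          · simp [List.foldl, pvStep, hm, ht, ih]
          · simp [List.foldl, pvStep, hm, ht, ih]
  | case5 c rest h1 h2 hm ih =>
      intro stack
      have hA : vmA_loop (c :: rest) stack =
          (if c = '_' ∨ c = '*' ∨ c = '`' then
            match stack with
            | t :: s => if t = c then vmA_loop rest s else vmA_loop rest (c :: t :: s)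
            | [] => vmA_loop rest [c]
          else vmA_loop rest stack) := by
        cases rest <;> cases stack <;> simp [vmA_loop]
      rw [hA, if_neg hm]
      simp only [vmB_extract, if_neg hm]
      exact ih stack

theorem pvStep_step (st : List Char) (c : Char) (h : List.IsChain (· ≠ ·) st) :
    pvStep (pvStep st c) c = st := by
  by_cases hm : c = '_' ∨ c = '*' ∨ c = '`'
  · cases st with
    | nil => simp [pvStep, hm]
    | cons t s =>
        by_cases ht : t = c
        · subst ht
          cases s with
          | nil => simp [pvStep, hm]
          | cons u s' =>
              have hu : u ≠ t := (List.rel_of_isChain_cons_cons h).symm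
              simp [pvStep, hm, hu]
        · simp [pvStep, hm, ht]
  · simp [pvStep, hm]

theorem pvStep_chain (st : List Char) (c : Char) (h : List.IsChain (· ≠ ·) st) :
    List.IsChain (· ≠ ·) (pvStep st c) := by
  by_cases hm : c = '_' ∨ c = '*' ∨ c = '`'
  · cases st with
    | nil => simp [pvStep, hm]
    | cons t s =>
        by_cases ht : t = c
        · simpa [pvStep, hm, ht] using h.tail
        · simp only [pvStep, if_pos hm, if_neg ht]
          exact List.isChain_cons_cons.mpr ⟨fun h' => ht h'.symm, h⟩
  · simpa [pvStep, hm] using h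

theorem fold_cancelOnce (w : List Char) :
    ∀ st, List.IsChain (· ≠ ·) st →
      (vmB_cancelOnce w).foldl pvStep st = w.foldl pvStep st := by
  induction w using vmB_cancelOnce.induct with
  | case1 b rest ih =>
      intro st hst
      rw [show vmB_cancelOnce (b :: b :: rest) = vmB_cancelOnce rest from by
        simp [vmB_cancelOnce]]
      simp only [List.foldl]
      rw [ih st hst, pvStep_step st b hst]
  | case2 a b rest h ih =>
      intro st hst
      simp only [vmB_cancelOnce, if_neg h, List.foldl]
      exact ih (pvStep st a) (pvStep_chain st a hst)
  | case3 l h => intro st hst; rw [cancelOnce_short l h]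

theorem fold_cancelFix (w : List Char) :
    (vmB_cancelFix w).foldl pvStep [] = w.foldl pvStep [] := by
  induction w using vmB_cancelFix.induct with
  | case1 x h ih => rw [vmB_cancelFix, dif_pos h]; rw [ih, fold_cancelOnce x [] (by simp)]
  | case2 x h => rw [vmB_cancelFix, dif_neg h]

theorem cancelFix_fixed (w : List Char) :
    ¬ (vmB_cancelOnce (vmB_cancelFix w)).length < (vmB_cancelFix w).length := by
  induction w using vmB_cancelFix.induct with
  | case1 x h ih => rw [vmB_cancelFix, dif_pos h]; exact ih
  | case2 x h => rw [vmB_cancelFix, dif_neg h]; exact h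

theorem cancelOnce_noshrink_chain (w : List Char) :
    ¬ (vmB_cancelOnce w).length < w.length → List.IsChain (· ≠ ·) w := by
  induction w using vmB_cancelOnce.induct with
  | case1 b rest ih =>
      intro hlen
      exfalso
      have := cancelOnce_length_le rest
      rw [show vmB_cancelOnce (b :: b :: rest) = vmB_cancelOnce rest from by
        simp [vmB_cancelOnce]] at hlen
      simp at hlen
      omega
  | case2 a b rest h ih =>
      intro hlen
      simp only [vmB_cancelOnce, if_neg h] at hlen
      simp at hlen
      refine List.isChain_cons_cons.mpr ⟨h, ih ?_⟩
      simp
      omega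
  | case3 l h =>
      intro _
      match l, h with
      | [], _ => exact List.isChain_nil
      | [a], _ => exact List.isChain_singleton a
      | a :: b :: rest, h => exact absurd rfl (by intro hh; exact h a b rest hh)

theorem extract_markers (cs : List Char) :
    ∀ c ∈ vmB_extract cs, c = '_' ∨ c = '*' ∨ c = '`' := by
  induction cs using vmB_extract.induct with
  | case1 => simp [vmB_extract]
  | case2 c rest ih => simpa [vmB_extract] using ih
  | case3 => intro c hc; simp [vmB_extract] at hc
  | case4 c rest h1 h2 hm ih =>
      intro x hx
      simp only [vmB_extract, if_pos hm] at hx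
      rcases List.mem_cons.mp hx with h | h
      · subst h; exact hm
      · exact ih x h
  | case5 c rest h1 h2 hm ih =>
      intro x hx
      simp only [vmB_extract, if_neg hm] at hx
      exact ih x hx

theorem cancelOnce_sub (w : List Char) : ∀ c ∈ vmB_cancelOnce w, c ∈ w := by
  induction w using vmB_cancelOnce.induct with
  | case1 b rest ih =>
      intro c hc
      simp only [vmB_cancelOnce] at hc
      simp at hc
      simp [ih c hc]
  | case2 a b rest h ih =>
      intro c hc
      simp only [vmB_cancelOnce, if_neg h] at hc
      rcases List.mem_cons.mp hc with h' | h'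
      · simp [h']
      · have := ih c h'
        simp at this ⊢
        tauto
  | case3 l h => intro c hc; rwa [cancelOnce_short l h] at hc

theorem cancelFix_sub (w : List Char) : ∀ c ∈ vmB_cancelFix w, c ∈ w := by
  induction w using vmB_cancelFix.induct with
  | case1 x h ih =>
      intro c hc
      rw [vmB_cancelFix, dif_pos h] at hc
      exact cancelOnce_sub x c (ih c hc)
  | case2 x h =>
      intro c hc
      rw [vmB_cancelFix, dif_neg h] at hc
      exact hc

theorem fold_chain_rev (w : List Char) :
    ∀ st, (∀ c ∈ w, c = '_' ∨ c = '*' ∨ c = '`') → List.IsChain (· ≠ ·) w →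
      (∀ t ∈ st.head?, ∀ a ∈ w.head?, t ≠ a) →
      w.foldl pvStep st = w.reverse ++ st := by
  induction w with
  | nil => intro st _ _ _; simp
  | cons a rest ih =>
      intro st hmk hch hhd
      have hm : a = '_' ∨ a = '*' ∨ a = '`' := hmk a (List.mem_cons_self ..)
      have hstep : pvStep st a = a :: st := by
        cases st with
        | nil => simp [pvStep, hm]
        | cons t s =>
            have ht : t ≠ a := hhd t rfl a rfl
            simp [pvStep, hm, ht]
      rw [List.foldl, hstep]
      rw [ih (a :: st) (fun c hc => hmk c (List.mem_cons_of_mem _ hc)) hch.tail ?_]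
      · simp
      · intro t ht b hb
        simp at ht
        subst ht
        cases rest with
        | nil => simp at hb
        | cons b' r =>
            simp at hb
            subst hb
            exact List.rel_of_isChain_cons_cons hch

-- ===== VERDICT =====
theorem validate_markdown_v2_spec : Claim_equal_validate_markdown_v2 := by
  intro text _
  unfold Spec_validate_markdown_v2 validate_markdown_v2 validate_markdown_v2_alt
  rw [vmA_eq_fold_extract, ← fold_cancelFix]
  set w := vmB_cancelFix (vmB_extract text.toList) with hw
  have hm : ∀ c ∈ w, c = '_' ∨ c = '*' ∨ c = '`' := by
    intro c hc
    exact extract_markers _ _ (cancelFix_sub _ _ hc)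
  have hch : List.Chain' (· ≠ ·) w :=
    cancelOnce_noshrink_chain _ (cancelFix_fixed _)
  rw [fold_chain_rev w [] hm hch (by simp)]
  simp
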